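-- pv_equiv track=rewrite | github.com/Bubbit/adventofcode | python/day3/code.py | part2
-- ===== SOURCE A (Python) =====
-- def part2(directions):
--   uniqueHouses = 1
--   santaX = 0
--   santaY = 0
--   roboX = 0
--   roboY = 0
--
--   visited = {'0.0'}
--
--   turn = 0
--
--   for direction in directions:
--     if direction == '^':
--       if turn == 0:
--         santaY += 1
--       else:
--         roboY += 1
--     elif direction == '>':
--       if turn == 0:
--         santaX += 1
--       else:
--         roboX += 1
--     elif direction == 'v':
--       if turn == 0:
--         santaY -= 1
--       else:
--         roboY -= 1
--     elif direction == '<':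
--       if turn == 0:
--         santaX -= 1
--       else:
--         roboX -= 1
--
--     if turn == 0:
--       coords = str(santaX) + "." + str(santaY)
--     else:
--       coords = str(roboX) + "." + str(roboY)
--
--     if coords not in visited:
--       uniqueHouses += 1
--       visited.add(coords)
--
--     if turn == 0:
--       turn = 1
--     else:
--       turn = 0
--
--   return uniqueHouses
-- ===== SOURCE B (Python) =====
-- def part2(directions):
--   visited = {(0, 0)}
--   for seq in (directions[0::2], directions[1::2]):
--     x = 0
--     y = 0
--     for c in seq:
--       if c == '^':
--         y += 1
--       elif c == '>':
--         x += 1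
--       elif c == 'v':
--         y -= 1
--       elif c == '<':
--         x -= 1
--       visited.add((x, y))
--   return len(visited)
-- ===== Notes on version B (the rewrite author's own statement) =====
-- stated objective: simpler
-- what changed: Replaces the turn toggle, the five-variable interleaved state, the string coordinate keys and the manual uniqueHouses counter with two independent walks over the parity slices directions[0::2] and directions[1::2], accumulating (x,y) tuples into one set seeded with the origin and returning its length.
import Mathlib
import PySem

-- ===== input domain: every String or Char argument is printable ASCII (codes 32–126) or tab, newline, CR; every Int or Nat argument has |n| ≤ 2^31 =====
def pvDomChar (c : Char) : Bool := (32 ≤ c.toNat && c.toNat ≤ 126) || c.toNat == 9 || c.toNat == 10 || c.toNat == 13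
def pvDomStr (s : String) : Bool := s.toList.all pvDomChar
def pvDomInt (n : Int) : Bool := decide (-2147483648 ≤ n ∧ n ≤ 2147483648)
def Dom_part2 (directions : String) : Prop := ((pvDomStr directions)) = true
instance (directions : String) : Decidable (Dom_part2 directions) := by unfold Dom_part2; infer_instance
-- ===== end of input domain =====

-- B replaces A's turn toggle, interleaved 5-variable state, string keys and manual counter
-- by two independent walks over the parity slices, one set of (x,y) pairs seeded with the origin.

-- ===== PORT A =====
-- one step of A's loop body; state = (uniqueHouses, santaX, santaY, roboX, roboY, visited, turn);
-- coordinate strings str(x) + "." + str(y) are ported on the char-list side (PySem.Int.toChars).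
def part2Step (st : Int × Int × Int × Int × Int × PySem.Set (List Char) × Int) (direction : Char) :
    Int × Int × Int × Int × Int × PySem.Set (List Char) × Int :=
  match st with
  | (uniqueHouses, santaX, santaY, roboX, roboY, visited, turn) =>
    let (santaX, santaY, roboX, roboY) :=
      if direction = '^' then
        (if turn = 0 then (santaX, santaY + 1, roboX, roboY) else (santaX, santaY, roboX, roboY + 1))
      else if direction = '>' then
        (if turn = 0 then (santaX + 1, santaY, roboX, roboY) else (santaX, santaY, roboX + 1, roboY))
      else if direction = 'v' then
        (if turn = 0 then (santaX, santaY - 1, roboX, roboY) else (santaX, santaY, roboX, roboY - 1))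
      else if direction = '<' then
        (if turn = 0 then (santaX - 1, santaY, roboX, roboY) else (santaX, santaY, roboX - 1, roboY))
      else (santaX, santaY, roboX, roboY)
    let coords : List Char :=
      if turn = 0 then PySem.Int.toChars santaX ++ ['.'] ++ PySem.Int.toChars santaY
      else PySem.Int.toChars roboX ++ ['.'] ++ PySem.Int.toChars roboY
    let (uniqueHouses, visited) :=
      if ¬ visited.contains coords then (uniqueHouses + 1, PySem.Set.add visited coords)
      else (uniqueHouses, visited)
    let turn := if turn = 0 then 1 else 0
    (uniqueHouses, santaX, santaY, roboX, roboY, visited, turn)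

def part2 (directions : String) : Int :=
  (directions.toList.foldl part2Step
    (1, 0, 0, 0, 0, PySem.Set.ofList [['0', '.', '0']], 0)).1

-- ===== PORT B =====
-- one step of Source B's inner loop; state = (x, y, visited)
def part2AltStep (st : Int × Int × PySem.Set (Int × Int)) (c : Char) :
    Int × Int × PySem.Set (Int × Int) :=
  match st with
  | (x, y, visited) =>
    let (x, y) :=
      if c = '^' then (x, y + 1)
      else if c = '>' then (x + 1, y)
      else if c = 'v' then (x, y - 1)
      else if c = '<' then (x - 1, y)
      else (x, y)
    (x, y, visited.add (x, y))

def part2_alt (directions : String) : Int :=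
  let cs := directions.toList
  -- directions[0::2] and directions[1::2]; step 2 ≠ 0 so slice? never returns none
  let seqs := [(PySem.Chars.slice? cs (some 0) none 2).getD [],
               (PySem.Chars.slice? cs (some 1) none 2).getD []]
  let visited := seqs.foldl
    (fun visited seq => (seq.foldl part2AltStep (0, 0, visited)).2.2)
    (PySem.Set.ofList [((0 : Int), (0 : Int))])
  PySem.Set.len visited

-- ===== PRECONDITION & SPEC =====
def Spec_part2 (directions : String) (out : Int) : Prop := out = part2_alt directions
instance (directions : String) (out : Int) : Decidable (Spec_part2 directions out) := by unfold Spec_part2; infer_instance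

-- ===== CLAIM (what is proved, stated in full; the proofs are below) =====
def Claim_equal_part2 : Prop := ∀ (directions : String), Dom_part2 directions → Spec_part2 directions (part2 directions)

-- ===== LEMMAS AND PROOFS =====


def evensL {α : Type} : List α → List α
  | [] => []
  | [a] => [a]
  | a :: _ :: t => a :: evensL t

lemma filt_evens {α : Type} (xs : List α) :
    List.filterMap (fun k => xs[2*k]?) (List.range ((xs.length+1)/2)) = evensL xs := by
  induction xs using evensL.induct with
  | case1 => simp [evensL]
  | case2 a => simp [evensL]
  | case3 a b t ih =>
      have hlen : ((a :: b :: t).length + 1) / 2 = (t.length + 1) / 2 + 1 := by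
        simp [List.length_cons]; omega
      rw [hlen, List.range_succ_eq_map, List.filterMap_cons, List.filterMap_map]
      simp only [Nat.mul_zero, List.getElem?_cons_zero]
      have : (fun k => (a :: b :: t)[2*(k+1)]?) = (fun k => t[2*k]?) := by
        funext k
        have h2 : 2*(k+1) = (2*k) + 1 + 1 := by ring
        rw [h2, List.getElem?_cons_succ, List.getElem?_cons_succ]
      simp only [Function.comp_def, this, ih, evensL]

lemma slice_evens {α : Type} (xs : List α) :
    PySem.List.slice? xs (some 0) none 2 = some (evensL xs) := by
  simp only [PySem.List.slice?, PySem.List.sliceIndices]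
  norm_num
  have hc : (if 0 < xs.length then (((xs.length : Int) + 2 - 1) / 2).toNat else 0) = (xs.length + 1)/2 := by
    split <;> omega
  have hf : (fun x : Nat => xs[(2 * (x:Int)).toNat]?) = fun k => xs[2*k]? := by
    funext k
    have : ((2:Int) * k).toNat = 2*k := by omega
    rw [this]
  rw [hc, hf, filt_evens]

lemma slice_odds {α : Type} (xs : List α) :
    PySem.List.slice? xs (some 1) none 2 = some (evensL xs.tail) := by
  cases xs with
  | nil => rfl
  | cons a t =>
      simp only [PySem.List.slice?, PySem.List.sliceIndices]
      norm_num
      have hc : (if 0 < t.length then (((t.length:Int) + 2 - 1) / 2).toNat else 0) = (t.length + 1)/2 := by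
        split <;> omega
      have hf : (fun x : Nat => (a :: t)[(1 + 2 * (x:Int)).toNat]?) = fun k => t[2*k]? := by
        funext k
        have : ((1:Int) + 2 * k).toNat = 2*k + 1 := by omega
        rw [this, List.getElem?_cons_succ]
      rw [hc, hf, filt_evens]


lemma toDigitsCore_eq (f : Nat) : ∀ (n : Nat) (acc : List Char), 0 < n → n < f →
    Nat.toDigitsCore 10 f n acc = ((Nat.digits 10 n).map Nat.digitChar).reverse ++ acc := by
  induction f with
  | zero => intro n acc h1 h2; omega
  | succ f ih =>
      intro n acc h1 h2
      show (if n / 10 = 0 then (n % 10).digitChar :: acc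
            else Nat.toDigitsCore 10 f (n / 10) ((n % 10).digitChar :: acc)) = _
      rw [Nat.digits_def' (by norm_num : 1 < 10) h1]
      by_cases h : n / 10 = 0
      · simp only [h, if_pos]
        have : Nat.digits 10 (n / 10) = [] := by rw [h]; simp
        simp
      · rw [if_neg h]
        rw [ih (n / 10) _ (Nat.pos_of_ne_zero h) (by omega)]
        simp

lemma toDigits_eq (n : Nat) (h : 0 < n) :
    Nat.toDigits 10 n = ((Nat.digits 10 n).map Nat.digitChar).reverse := by
  rw [Nat.toDigits, toDigitsCore_eq (n+1) n [] h (by omega), List.append_nil]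

lemma digitChar_inj_lt : ∀ d < 10, ∀ e < 10, Nat.digitChar d = Nat.digitChar e → d = e := by decide

lemma digitChar_mem_toDigits (n : Nat) (c : Char) (hc : c ∈ Nat.toDigits 10 n) :
    ∃ d < 10, c = Nat.digitChar d := by
  rcases Nat.eq_zero_or_pos n with h | h
  · subst h; simp only [show Nat.toDigits 10 0 = ['0'] from rfl, List.mem_singleton] at hc
    exact ⟨0, by norm_num, by rw [hc]; rfl⟩
  · rw [toDigits_eq n h] at hc
    simp only [List.mem_reverse, List.mem_map] at hc
    obtain ⟨d, hd, rfl⟩ := hc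
    exact ⟨d, Nat.digits_lt_base (by norm_num) hd, rfl⟩

lemma toDigits_ne_zero_char (n : Nat) (c : Char) (hc : c ∈ Nat.toDigits 10 n) : c ≠ '-' ∧ c ≠ '.' := by
  obtain ⟨d, hd, rfl⟩ := digitChar_mem_toDigits n c hc
  interval_cases d <;> decide

lemma map_digitChar_inj : ∀ (l1 l2 : List Nat), (∀ d ∈ l1, d < 10) → (∀ d ∈ l2, d < 10) →
    l1.map Nat.digitChar = l2.map Nat.digitChar → l1 = l2 := by
  intro l1
  induction l1 with
  | nil => intro l2 _ _ h; cases l2 <;> simp_all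
  | cons a t ih =>
      intro l2 h1 h2 h
      cases l2 with
      | nil => simp_all
      | cons b t2 =>
          simp only [List.map_cons, List.cons.injEq] at h
          have ha := digitChar_inj_lt a (h1 a (by simp)) b (h2 b (by simp)) h.1
          rw [ha, ih t2 (fun d hd => h1 d (by simp [hd])) (fun d hd => h2 d (by simp [hd])) h.2]

lemma toDigits_pos_ne_zero_str (n : Nat) (hn : 0 < n) : Nat.toDigits 10 n ≠ ['0'] := by
  rw [toDigits_eq n hn]
  intro h
  rw [List.reverse_eq_iff] at h
  have : Nat.digits 10 n = [0] := by
    refine map_digitChar_inj _ [0] (fun d hd => Nat.digits_lt_base (by norm_num) hd) (by norm_num) ?_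
    rw [h]; rfl
  have h0 := Nat.ofDigits_digits 10 n
  rw [this] at h0
  simp [Nat.ofDigits] at h0
  omega

lemma toDigits_inj (m n : Nat) (h : Nat.toDigits 10 m = Nat.toDigits 10 n) : m = n := by
  rcases Nat.eq_zero_or_pos m with hm | hm <;> rcases Nat.eq_zero_or_pos n with hn | hn
  · omega
  · exact absurd h.symm (by subst hm; exact toDigits_pos_ne_zero_str n hn)
  · exact absurd h (by subst hn; exact toDigits_pos_ne_zero_str m hm)
  · rw [toDigits_eq m hm, toDigits_eq n hn] at h
    have := map_digitChar_inj (Nat.digits 10 m) (Nat.digits 10 n)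
      (fun d hd => Nat.digits_lt_base (by norm_num) hd)
      (fun d hd => Nat.digits_lt_base (by norm_num) hd)
      (by rw [← List.reverse_inj]; exact h)
    exact Nat.digits.injective 10 this

lemma dash_not_mem_toDigits (n : Nat) : '-' ∉ Nat.toDigits 10 n :=
  fun h => (toDigits_ne_zero_char n '-' h).1 rfl

lemma toChars_inj : Function.Injective PySem.Int.toChars := by
  intro m n h
  unfold PySem.Int.toChars at h
  split_ifs at h with hm hn hn
  · have := toDigits_inj _ _ (by injection h)
    omega
  · exact absurd (h ▸ List.mem_cons_self ..) (dash_not_mem_toDigits n.toNat)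
  · exact absurd (h ▸ List.mem_cons_self ..) (dash_not_mem_toDigits m.toNat)
  · have := toDigits_inj _ _ h
    omega

lemma dot_not_mem_toChars (n : Int) : '.' ∉ PySem.Int.toChars n := by
  unfold PySem.Int.toChars
  split_ifs
  · intro h
    rcases List.mem_cons.mp h with h | h
    · exact absurd h (by decide)
    · exact (toDigits_ne_zero_char _ '.' h).2 rfl
  · intro h; exact (toDigits_ne_zero_char _ '.' h).2 rfl

def encPos (p : Int × Int) : List Char :=
  PySem.Int.toChars p.1 ++ ['.'] ++ PySem.Int.toChars p.2

lemma split_dot : ∀ (u u' v v' : List Char), '.' ∉ u → '.' ∉ u' →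
    u ++ ['.'] ++ v = u' ++ ['.'] ++ v' → u = u' ∧ v = v' := by
  intro u
  induction u with
  | nil =>
      intro u' v v' _ hu' h
      cases u' with
      | nil => simpa using h
      | cons a t =>
          exfalso
          simp only [List.nil_append, List.cons_append, List.cons.injEq] at h
          exact hu' (h.1 ▸ List.mem_cons_self ..)
  | cons a t ih =>
      intro u' v v' hu hu' h
      cases u' with
      | nil =>
          exfalso
          simp only [List.nil_append, List.cons_append, List.cons.injEq] at h
          exact hu (h.1.symm ▸ List.mem_cons_self ..)
      | cons b t2 =>
          simp only [List.cons_append, List.cons.injEq] at h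
          obtain ⟨ht, hv⟩ := ih t2 v v' (fun hx => hu (List.mem_cons_of_mem a hx))
            (fun hx => hu' (List.mem_cons_of_mem b hx)) h.2
          exact ⟨by rw [h.1, ht], hv⟩

lemma encPos_inj : Function.Injective encPos := by
  intro p q h
  unfold encPos at h
  obtain ⟨h1, h2⟩ := split_dot _ _ _ _ (dot_not_mem_toChars p.1) (dot_not_mem_toChars q.1) h
  exact Prod.ext (toChars_inj h1) (toChars_inj h2)

lemma ofList_map_inj {α β : Type} [BEq α] [LawfulBEq α] [BEq β] [LawfulBEq β]
    (f : α → β) (hf : Function.Injective f) (xs : List α) :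
    PySem.Set.ofList (xs.map f) = (PySem.Set.ofList xs).map f := by
  induction xs using List.reverseRecOn with
  | nil => rfl
  | append_singleton xs x ih =>
      rw [List.map_append, List.map_singleton, PySem.Set.ofList_append_singleton,
        PySem.Set.ofList_append_singleton, ih, PySem.Set.add_eq_ite, PySem.Set.add_eq_ite]
      by_cases hx : x ∈ PySem.Set.ofList xs
      · rw [if_pos hx, if_pos (by rw [List.mem_map_of_injective hf]; exact hx)]
      · rw [if_neg hx, if_neg (by rw [List.mem_map_of_injective hf]; exact hx), List.map_append,
          List.map_singleton]

lemma length_ofList_eq_of_mem_iff {α : Type} [BEq α] [LawfulBEq α] (xs ys : List α)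
    (h : ∀ x, x ∈ xs ↔ x ∈ ys) :
    (PySem.Set.ofList xs).length = (PySem.Set.ofList ys).length := by
  refine List.Perm.length_eq ?_
  rw [List.perm_ext_iff_of_nodup (PySem.Set.nodup_ofList xs) (PySem.Set.nodup_ofList ys)]
  intro a
  rw [PySem.Set.mem_ofList, PySem.Set.mem_ofList]
  exact h a

lemma ofList_append_update {α : Type} [BEq α] (xs ys : List α) :
    PySem.Set.ofList (xs ++ ys) = PySem.Set.update (PySem.Set.ofList xs) ys := by
  rw [PySem.Set.ofList_eq_foldl, PySem.Set.ofList_eq_foldl, List.foldl_append]; rfl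

def mv (c : Char) (p : Int × Int) : Int × Int :=
  if c = '^' then (p.1, p.2 + 1)
  else if c = '>' then (p.1 + 1, p.2)
  else if c = 'v' then (p.1, p.2 - 1)
  else if c = '<' then (p.1 - 1, p.2)
  else p

def walk : List Char → Int × Int → List (Int × Int)
  | [], _ => []
  | c :: rest, p => mv c p :: walk rest (mv c p)

def recsA : List Char → Int × Int → Int × Int → Int → List (Int × Int)
  | [], _, _, _ => []
  | c :: rest, s, r, t =>
    if t = 0 then mv c s :: recsA rest (mv c s) r 1
    else mv c r :: recsA rest s (mv c r) 0

lemma altStep_eq (x y : Int) (vis : PySem.Set (Int × Int)) (c : Char) :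
    part2AltStep (x, y, vis) c =
      ((mv c (x, y)).1, (mv c (x, y)).2, vis.add (mv c (x, y))) := by
  simp only [part2AltStep, mv]

lemma stepA_zero (u sx sy rx ry : Int) (vis : PySem.Set (List Char)) (c : Char) :
    part2Step (u, sx, sy, rx, ry, vis, 0) c =
      ((if encPos (mv c (sx, sy)) ∈ vis then u else u + 1),
        (mv c (sx, sy)).1, (mv c (sx, sy)).2, rx, ry,
        vis.add (encPos (mv c (sx, sy))), 1) := by
  simp only [part2Step, mv, encPos]
  split_ifs <;>
    simp_all [PySem.Set.add_of_mem]

lemma stepA_one (u sx sy rx ry : Int) (vis : PySem.Set (List Char)) (t : Int) (ht : t ≠ 0) (c : Char) :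
    part2Step (u, sx, sy, rx, ry, vis, t) c =
      ((if encPos (mv c (rx, ry)) ∈ vis then u else u + 1),
        sx, sy, (mv c (rx, ry)).1, (mv c (rx, ry)).2,
        vis.add (encPos (mv c (rx, ry))), 0) := by
  simp only [part2Step, mv, encPos]
  split_ifs <;>
    simp_all [PySem.Set.add_of_mem]

lemma foldB (cs : List Char) : ∀ (x y : Int) (vis : PySem.Set (Int × Int)),
    (cs.foldl part2AltStep (x, y, vis)).2.2 = PySem.Set.update vis (walk cs (x, y)) := by
  induction cs with
  | nil => intro x y vis; rfl
  | cons c rest ih =>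
      intro x y vis
      rw [List.foldl_cons, altStep_eq, ih, walk]
      rfl

lemma foldA (cs : List Char) : ∀ (u sx sy rx ry : Int) (vis : PySem.Set (List Char)) (t : Int),
    u = (vis.length : Int) →
    (cs.foldl part2Step (u, sx, sy, rx, ry, vis, t)).1
      = ((PySem.Set.update vis ((recsA cs (sx, sy) (rx, ry) t).map encPos)).length : Int) := by
  induction cs with
  | nil => intro u sx sy rx ry vis t h; simpa [recsA, PySem.Set.update] using h
  | cons c rest ih =>
      intro u sx sy rx ry vis t h
      by_cases ht : t = 0
      · subst ht
        rw [List.foldl_cons, stepA_zero, recsA]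
        have hu : (if encPos (mv c (sx, sy)) ∈ vis then u else u + 1)
            = ((vis.add (encPos (mv c (sx, sy)))).length : Int) := by
          by_cases hm : encPos (mv c (sx, sy)) ∈ vis
          · rw [if_pos hm, PySem.Set.add_of_mem hm]; exact h
          · rw [if_neg hm, PySem.Set.add_of_not_mem hm, List.length_append]
            simp [h]
        rw [ih _ _ _ _ _ _ _ hu]
        rfl
      · rw [List.foldl_cons, stepA_one _ _ _ _ _ _ _ ht, recsA, if_neg ht]
        have hu : (if encPos (mv c (rx, ry)) ∈ vis then u else u + 1)
            = ((vis.add (encPos (mv c (rx, ry)))).length : Int) := by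
          by_cases hm : encPos (mv c (rx, ry)) ∈ vis
          · rw [if_pos hm, PySem.Set.add_of_mem hm]; exact h
          · rw [if_neg hm, PySem.Set.add_of_not_mem hm, List.length_append]
            simp [h]
        rw [ih _ _ _ _ _ _ _ hu]
        rfl

lemma evensL_cons {α : Type} (c : α) (rest : List α) :
    evensL (c :: rest) = c :: evensL rest.tail := by
  cases rest <;> rfl

lemma recsA_perm (cs : List Char) : ∀ (s r : Int × Int),
    (recsA cs s r 0).Perm (walk (evensL cs) s ++ walk (evensL cs.tail) r)
    ∧ (recsA cs s r 1).Perm (walk (evensL cs) r ++ walk (evensL cs.tail) s) := by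
  induction cs with
  | nil => intro s r; constructor <;> simp [recsA, evensL, walk]
  | cons c rest ih =>
      intro s r
      rw [evensL_cons, List.tail_cons]
      constructor
      · rw [recsA, if_pos rfl, walk, List.cons_append]
        exact ((ih (mv c s) r).2.trans (List.perm_append_comm ..)).cons (mv c s)
      · rw [recsA, if_neg one_ne_zero, walk, List.cons_append]
        exact ((ih s (mv c r)).1.trans (List.perm_append_comm ..)).cons (mv c r)

theorem main (directions : String) : part2 directions = part2_alt directions := by
  unfold part2 part2_alt
  set cs := directions.toList with hcs
  -- A side
  rw [foldA cs 1 0 0 0 0 (PySem.Set.ofList [['0', '.', '0']]) 0 (by rfl)]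
  have h00 : (['0', '.', '0'] : List Char) = encPos (0, 0) := by rfl
  rw [h00, show PySem.Set.ofList [encPos (0,0)] = PySem.Set.ofList ([encPos (0,0)] ++ []) from by simp,
    ofList_append_update]
  rw [← ofList_append_update, ← ofList_append_update]
  -- now A = length of ofList ([encPos (0,0)] ++ [] ++ map encPos recs) ; normalize
  -- B side
  simp only [PySem.Chars.slice?, slice_evens, slice_odds, Option.getD_some, List.foldl_cons,
    List.foldl_nil, foldB, PySem.Set.len]
  rw [show (PySem.Set.ofList [((0:Int), (0:Int))] : PySem.Set (Int × Int)) = PySem.Set.ofList ([((0:Int),(0:Int))]) from rfl]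
  rw [← ofList_append_update, ← ofList_append_update]
  have hA : ([encPos (0,0)] ++ [] ++ (recsA cs (0,0) (0,0) 0).map encPos)
      = (((0,0) :: recsA cs (0,0) (0,0) 0).map encPos) := by simp
  rw [hA, ofList_map_inj encPos encPos_inj, List.length_map]
  have hperm := (recsA_perm cs (0,0) (0,0)).1
  have hmem : ∀ x, x ∈ ((0,0) :: recsA cs (0,0) (0,0) 0)
      ↔ x ∈ ([((0:Int),(0:Int))] ++ walk (evensL cs) (0,0) ++ walk (evensL cs.tail) (0,0)) := by
    intro x
    simp only [List.mem_cons, List.mem_append, hperm.mem_iff]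
    tauto
  rw [length_ofList_eq_of_mem_iff _ _ hmem]

-- ===== VERDICT (by name: the statement is the Claim_ definition above) =====
theorem part2_spec : Claim_equal_part2 := by
  intro directions _
  unfold Spec_part2
  exact main directions
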